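-- pv_equiv track=rewrite | github.com/mehmeteminkilic/Python-Coding-Journey | iPy17.py | arrayStringsAreEqual3
-- ===== SOURCE A (Python) =====
-- def arrayStringsAreEqual3(word1:list, word2:list):
--     iword1 = ""
--     iword2 = ""
--     for data1 in word1: iword1 += data1
--     for data2 in word2: iword2 += data2
--
--     if iword1 == iword2:
--         return True
--     else:
--        return False
-- ===== SOURCE B (Python) =====
-- def arrayStringsAreEqual3(word1: list, word2: list):
--     # stream the characters of both lists with two cursors (word index + char index);
--     # never build the concatenations
--     i1 = j1 = i2 = j2 = 0
--     while True:
--         while i1 < len(word1) and j1 == len(word1[i1]):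
--             i1 += 1
--             j1 = 0
--         while i2 < len(word2) and j2 == len(word2[i2]):
--             i2 += 1
--             j2 = 0
--         if i1 == len(word1) or i2 == len(word2):
--             return i1 == len(word1) and i2 == len(word2)
--         if word1[i1][j1] != word2[i2][j2]:
--             return False
--         j1 += 1
--         j2 += 1
-- ===== Notes on version B (the rewrite author's own statement) =====
-- stated objective: faster
-- what changed: B streams the characters of both word lists with two cursors (word index + char index), returning False at the first differing character and never building the concatenated strings that A constructs and compares.
import Mathlib
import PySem

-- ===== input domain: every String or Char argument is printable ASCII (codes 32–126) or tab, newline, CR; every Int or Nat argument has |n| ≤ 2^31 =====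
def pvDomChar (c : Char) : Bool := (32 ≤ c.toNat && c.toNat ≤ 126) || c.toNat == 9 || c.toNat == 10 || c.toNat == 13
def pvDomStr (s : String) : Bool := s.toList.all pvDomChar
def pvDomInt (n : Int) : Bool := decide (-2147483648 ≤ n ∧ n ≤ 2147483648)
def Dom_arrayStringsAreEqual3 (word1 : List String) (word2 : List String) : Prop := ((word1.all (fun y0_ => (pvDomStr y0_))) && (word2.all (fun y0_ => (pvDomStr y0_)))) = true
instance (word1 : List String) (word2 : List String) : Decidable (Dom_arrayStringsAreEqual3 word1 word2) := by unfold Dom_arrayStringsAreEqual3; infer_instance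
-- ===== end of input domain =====

-- B streams the characters of both lists with two cursors (word index + char index), returning at the
-- first mismatch and never building the concatenations; A concatenates both lists and compares.

set_option maxRecDepth 4000

-- ===== PORT A =====
def arrayStringsAreEqual3 (word1 : List String) (word2 : List String) : Bool :=
  let iword1 := word1.foldl (fun acc data1 => acc ++ data1) ""
  let iword2 := word2.foldl (fun acc data2 => acc ++ data2) ""
  if iword1 == iword2 then true else false

-- ===== PORT B =====
-- characters in the whole list (fuel bound for the outer loop)
def pvTotal (w : List String) : Nat := (w.map (fun s => s.toList.length)).sum

-- Source B's inner `while i < len(word) and j == len(word[i]): i += 1; j = 0`;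
-- the fuel argument only makes the recursion structural: fuel = w.length always suffices
def pvAdvance (w : List String) : Nat → Nat → Nat → Nat × Nat
  | 0, i, j => (i, j)
  | fuel + 1, i, j =>
    if i < w.length ∧ j = (w.getD i "").toList.length then pvAdvance w fuel (i + 1) 0
    else (i, j)

-- Source B's outer `while True` loop; fuel = pvTotal w1 + 1 always suffices (one character of the
-- first stream is consumed per iteration), so the fuel-0 branch is never reached
def pvCmpLoop (w1 w2 : List String) : Nat → Nat → Nat → Nat → Nat → Bool
  | 0, _, _, _, _ => false
  | fuel + 1, i1, j1, i2, j2 =>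
    if (pvAdvance w1 w1.length i1 j1).1 = w1.length ∨ (pvAdvance w2 w2.length i2 j2).1 = w2.length then
      decide ((pvAdvance w1 w1.length i1 j1).1 = w1.length ∧ (pvAdvance w2 w2.length i2 j2).1 = w2.length)
    else
      match (w1.getD (pvAdvance w1 w1.length i1 j1).1 "").toList[(pvAdvance w1 w1.length i1 j1).2]?,
            (w2.getD (pvAdvance w2 w2.length i2 j2).1 "").toList[(pvAdvance w2 w2.length i2 j2).2]? with
      | some c, some d =>
        -- the two indexings are in range whenever the loop is reached from (0,0,0,0), as in Python
        if c ≠ d then false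
        else pvCmpLoop w1 w2 fuel
              (pvAdvance w1 w1.length i1 j1).1 ((pvAdvance w1 w1.length i1 j1).2 + 1)
              (pvAdvance w2 w2.length i2 j2).1 ((pvAdvance w2 w2.length i2 j2).2 + 1)
      | _, _ => false

def arrayStringsAreEqual3_alt (word1 : List String) (word2 : List String) : Bool :=
  pvCmpLoop word1 word2 (pvTotal word1 + 1) 0 0 0 0

-- ===== PRECONDITION & SPEC =====
def Spec_arrayStringsAreEqual3 (word1 : List String) (word2 : List String) (out : Bool) : Prop := out = arrayStringsAreEqual3_alt word1 word2
instance (word1 : List String) (word2 : List String) (out : Bool) : Decidable (Spec_arrayStringsAreEqual3 word1 word2 out) := by unfold Spec_arrayStringsAreEqual3; infer_instance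

-- ===== CLAIM (what is proved, stated in full; the proofs are below) =====
def Claim_equal_arrayStringsAreEqual3 : Prop := ∀ (word1 : List String) (word2 : List String), Dom_arrayStringsAreEqual3 word1 word2 → Spec_arrayStringsAreEqual3 word1 word2 (arrayStringsAreEqual3 word1 word2)

-- ===== LEMMAS AND PROOFS =====

-- characters contained in the first i words (bookkeeping for the proofs)
def pvConsumed (w : List String) (i : Nat) : Nat := ((w.take i).map (fun s => s.toList.length)).sum

theorem pvConsumed_succ (w : List String) (i : Nat) (hi : i < w.length) :
    pvConsumed w (i + 1) = pvConsumed w i + (w.getD i "").toList.length := by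
  unfold pvConsumed
  rw [List.take_succ_eq_append_getElem hi, List.map_append, List.sum_append,
      List.getD_eq_getElem w "" hi]
  simp only [List.map_cons, List.map_nil, List.sum_cons, List.sum_nil, Nat.add_zero]

theorem pvConsumed_word_le (w : List String) (i : Nat) (h : i < w.length) :
    pvConsumed w i + (w.getD i "").toList.length ≤ pvTotal w := by
  have hsplit : pvTotal w = pvConsumed w (i + 1) + ((w.drop (i+1)).map (fun s => s.toList.length)).sum := by
    unfold pvTotal pvConsumed
    rw [← List.sum_append, ← List.map_append, List.take_append_drop]
  have hstep := pvConsumed_succ w i h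
  omega

theorem pvConsumed_length (w : List String) : pvConsumed w w.length = pvTotal w := by
  unfold pvConsumed pvTotal
  rw [List.take_length]

theorem pvConsumed_j_le (w : List String) (i j : Nat) (hi : i ≤ w.length)
    (hj : j ≤ (w.getD i "").toList.length) : pvConsumed w i + j ≤ pvTotal w := by
  rcases Nat.lt_or_ge i w.length with h | h
  · have := pvConsumed_word_le w i h
    omega
  · have hi' : i = w.length := by omega
    subst hi'
    rw [List.getD_eq_default _ _ (Nat.le_refl _)] at hj
    simp at hj
    have := pvConsumed_length w
    omega

theorem pvAdvance_pres (w : List String) (fuel i j : Nat) :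
    pvConsumed w (pvAdvance w fuel i j).1 + (pvAdvance w fuel i j).2 = pvConsumed w i + j := by
  fun_induction pvAdvance w fuel i j with
  | case1 i j => rfl
  | case2 fuel i j h ih =>
    obtain ⟨hi, hj⟩ := h
    rw [ih]
    have hstep := pvConsumed_succ w i hi
    omega
  | case3 fuel i j h => rfl

theorem pvAdvance_le (w : List String) (fuel i j : Nat) (hi : i ≤ w.length) :
    (pvAdvance w fuel i j).1 ≤ w.length := by
  fun_induction pvAdvance w fuel i j with
  | case1 i j => simpa
  | case2 fuel i j h ih => exact ih (by omega)
  | case3 fuel i j h => simpa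

theorem pvAdvance_j_le (w : List String) (fuel i j : Nat) (hj : j ≤ (w.getD i "").toList.length) :
    (pvAdvance w fuel i j).2 ≤ (w.getD (pvAdvance w fuel i j).1 "").toList.length := by
  fun_induction pvAdvance w fuel i j with
  | case1 i j => simpa
  | case2 fuel i j h ih => exact ih (Nat.zero_le _)
  | case3 fuel i j h => simpa

theorem pvAdvance_fix (w : List String) (fuel i j : Nat) (hf : w.length ≤ i + fuel) :
    ¬ ((pvAdvance w fuel i j).1 < w.length ∧
       (pvAdvance w fuel i j).2 = (w.getD (pvAdvance w fuel i j).1 "").toList.length) := by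
  fun_induction pvAdvance w fuel i j with
  | case1 i j =>
    intro hc
    have : i < w.length := hc.1
    omega
  | case2 fuel i j h ih => exact ih (by omega)
  | case3 fuel i j h => simpa using h

-- the stream of characters still to be read from cursor (i, j)
def pvRest (w : List String) (i j : Nat) : List Char :=
  (((w.drop i).map String.toList).flatten).drop j

theorem pvRest_flatten_head (w : List String) (i j : Nat) (hi : i < w.length)
    (hj : j < (w.getD i "").toList.length) :
    pvRest w i j = (w.getD i "").toList[j]! :: pvRest w i (j + 1) := by
  unfold pvRest
  rw [List.drop_eq_getElem_cons hi]
  rw [List.getD_eq_getElem w "" hi] at hj ⊢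
  have hlen : j < (w[i].toList ++ ((w.drop (i+1)).map String.toList).flatten).length := by
    rw [List.length_append]; omega
  rw [List.map_cons, List.flatten_cons, List.drop_eq_getElem_cons hlen]
  congr 1
  rw [List.getElem_append_left hj]
  simp [List.getElem!_eq_getElem?_getD, List.getElem?_eq_getElem hj]

theorem pvRest_end (w : List String) (i j : Nat) (hi : w.length ≤ i) : pvRest w i j = [] := by
  unfold pvRest
  rw [List.drop_eq_nil_of_le hi]
  simp

theorem pvAdvance_rest (w : List String) (fuel i j : Nat) :
    pvRest w (pvAdvance w fuel i j).1 (pvAdvance w fuel i j).2 = pvRest w i j := by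
  fun_induction pvAdvance w fuel i j with
  | case1 i j => rfl
  | case2 fuel i j h ih =>
    obtain ⟨hi, hj⟩ := h
    rw [ih]
    unfold pvRest
    rw [List.drop_eq_getElem_cons hi, List.map_cons, List.flatten_cons,
        List.getD_eq_getElem w "" hi] at *
    rw [hj, List.drop_left]
    simp
  | case3 fuel i j h => rfl

theorem pvCmpLoop_eq_rest (w1 w2 : List String) (fuel i1 j1 i2 j2 : Nat)
    (hvi1 : i1 ≤ w1.length) (hvj1 : j1 ≤ (w1.getD i1 "").toList.length)
    (hvi2 : i2 ≤ w2.length) (hvj2 : j2 ≤ (w2.getD i2 "").toList.length)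
    (hfuel : pvTotal w1 + 1 ≤ fuel + pvConsumed w1 i1 + j1) :
    pvCmpLoop w1 w2 fuel i1 j1 i2 j2 = decide (pvRest w1 i1 j1 = pvRest w2 i2 j2) := by
  fun_induction pvCmpLoop w1 w2 fuel i1 j1 i2 j2 with
  | case1 i1 j1 i2 j2 =>
    exfalso
    have := pvConsumed_j_le w1 i1 j1 hvi1 hvj1
    omega
  | case2 fuel i1 j1 i2 j2 hends =>
    rw [← pvAdvance_rest w1 w1.length i1 j1, ← pvAdvance_rest w2 w2.length i2 j2]
    have ha1 := pvAdvance_le w1 w1.length i1 j1 hvi1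
    have hb1 := pvAdvance_j_le w1 w1.length i1 j1 hvj1
    have ha2 := pvAdvance_le w2 w2.length i2 j2 hvi2
    have hb2 := pvAdvance_j_le w2 w2.length i2 j2 hvj2
    have hf1 := pvAdvance_fix w1 w1.length i1 j1 (by omega)
    have hf2 := pvAdvance_fix w2 w2.length i2 j2 (by omega)
    rcases Nat.lt_or_ge (pvAdvance w1 w1.length i1 j1).1 w1.length with h1 | h1
    · -- then the second stream must be at its end and the first strictly inside a word
      have h2 : w2.length ≤ (pvAdvance w2 w2.length i2 j2).1 := by
        rcases hends with hh | hh
        · omega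
        · omega
      have hj1 : (pvAdvance w1 w1.length i1 j1).2 < (w1.getD (pvAdvance w1 w1.length i1 j1).1 "").toList.length := by
        rcases Nat.lt_or_ge (pvAdvance w1 w1.length i1 j1).2 (w1.getD (pvAdvance w1 w1.length i1 j1).1 "").toList.length with hlt | hge
        · exact hlt
        · exact absurd ⟨h1, by omega⟩ hf1
      rw [pvRest_end w2 _ _ h2, pvRest_flatten_head w1 _ _ h1 hj1]
      simp
      omega
    · rw [pvRest_end w1 _ _ h1]
      rcases Nat.lt_or_ge (pvAdvance w2 w2.length i2 j2).1 w2.length with h2 | h2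
      · have hj2 : (pvAdvance w2 w2.length i2 j2).2 < (w2.getD (pvAdvance w2 w2.length i2 j2).1 "").toList.length := by
          rcases Nat.lt_or_ge (pvAdvance w2 w2.length i2 j2).2 (w2.getD (pvAdvance w2 w2.length i2 j2).1 "").toList.length with hlt | hge
          · exact hlt
          · exact absurd ⟨h2, by omega⟩ hf2
        rw [pvRest_flatten_head w2 _ _ h2 hj2]
        simp
        omega
      · rw [pvRest_end w2 _ _ h2]
        simp
        omega
  | case3 fuel i1 j1 i2 j2 hends c d h2 h1 hne =>
    -- heads differ: both rests are nonempty with different heads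
    rw [← pvAdvance_rest w1 w1.length i1 j1, ← pvAdvance_rest w2 w2.length i2 j2]
    rw [not_or] at hends
    have ha1 := pvAdvance_le w1 w1.length i1 j1 hvi1
    have ha2 := pvAdvance_le w2 w2.length i2 j2 hvi2
    have hi1 : (pvAdvance w1 w1.length i1 j1).1 < w1.length := by
      rcases hends with ⟨hh, -⟩; omega
    have hi2 : (pvAdvance w2 w2.length i2 j2).1 < w2.length := by
      rcases hends with ⟨-, hh⟩; omega
    have hj1 : (pvAdvance w1 w1.length i1 j1).2 < (w1.getD (pvAdvance w1 w1.length i1 j1).1 "").toList.length :=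
      (List.getElem?_eq_some_iff.mp h1).1
    have hj2 : (pvAdvance w2 w2.length i2 j2).2 < (w2.getD (pvAdvance w2 w2.length i2 j2).1 "").toList.length :=
      (List.getElem?_eq_some_iff.mp h2).1
    rw [pvRest_flatten_head w1 _ _ hi1 hj1, pvRest_flatten_head w2 _ _ hi2 hj2]
    have h1' := h1
    have h2' := h2
    simp only [List.getD_eq_getElem?_getD] at h1' h2'
    have hc : (w1.getD (pvAdvance w1 w1.length i1 j1).1 "").toList[(pvAdvance w1 w1.length i1 j1).2]! = c := by
      simp only [List.getElem!_eq_getElem?_getD, List.getD_eq_getElem?_getD, h1', Option.getD_some]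
    have hd : (w2.getD (pvAdvance w2 w2.length i2 j2).1 "").toList[(pvAdvance w2 w2.length i2 j2).2]! = d := by
      simp only [List.getElem!_eq_getElem?_getD, List.getD_eq_getElem?_getD, h2', Option.getD_some]
    rw [hc, hd]
    simp [hne]
  | case4 fuel i1 j1 i2 j2 hends c d h2 h1 hne ih =>
    rw [← pvAdvance_rest w1 w1.length i1 j1, ← pvAdvance_rest w2 w2.length i2 j2]
    rw [not_or] at hends
    have ha1 := pvAdvance_le w1 w1.length i1 j1 hvi1
    have ha2 := pvAdvance_le w2 w2.length i2 j2 hvi2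
    have hi1 : (pvAdvance w1 w1.length i1 j1).1 < w1.length := by
      rcases hends with ⟨hh, -⟩; omega
    have hi2 : (pvAdvance w2 w2.length i2 j2).1 < w2.length := by
      rcases hends with ⟨-, hh⟩; omega
    have hj1 : (pvAdvance w1 w1.length i1 j1).2 < (w1.getD (pvAdvance w1 w1.length i1 j1).1 "").toList.length :=
      (List.getElem?_eq_some_iff.mp h1).1
    have hj2 : (pvAdvance w2 w2.length i2 j2).2 < (w2.getD (pvAdvance w2 w2.length i2 j2).1 "").toList.length :=
      (List.getElem?_eq_some_iff.mp h2).1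
    rw [pvRest_flatten_head w1 _ _ hi1 hj1, pvRest_flatten_head w2 _ _ hi2 hj2]
    have h1' := h1
    have h2' := h2
    simp only [List.getD_eq_getElem?_getD] at h1' h2'
    have hc : (w1.getD (pvAdvance w1 w1.length i1 j1).1 "").toList[(pvAdvance w1 w1.length i1 j1).2]! = c := by
      simp only [List.getElem!_eq_getElem?_getD, List.getD_eq_getElem?_getD, h1', Option.getD_some]
    have hd : (w2.getD (pvAdvance w2 w2.length i2 j2).1 "").toList[(pvAdvance w2 w2.length i2 j2).2]! = d := by
      simp only [List.getElem!_eq_getElem?_getD, List.getD_eq_getElem?_getD, h2', Option.getD_some]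
    simp only [ne_eq, not_not] at hne
    subst hne
    rw [hc, hd]
    have hpres := pvAdvance_pres w1 w1.length i1 j1
    rw [ih (by omega) (by omega) (by omega) (by omega) (by omega)]
    simp
  | case5 fuel i1 j1 i2 j2 hends hno =>
    -- out-of-range indexing: impossible for valid cursors not at the end
    exfalso
    rw [not_or] at hends
    have ha1 := pvAdvance_le w1 w1.length i1 j1 hvi1
    have hb1 := pvAdvance_j_le w1 w1.length i1 j1 hvj1
    have ha2 := pvAdvance_le w2 w2.length i2 j2 hvi2
    have hb2 := pvAdvance_j_le w2 w2.length i2 j2 hvj2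
    have hf1 := pvAdvance_fix w1 w1.length i1 j1 (by omega)
    have hf2 := pvAdvance_fix w2 w2.length i2 j2 (by omega)
    have hj1 : (pvAdvance w1 w1.length i1 j1).2 < (w1.getD (pvAdvance w1 w1.length i1 j1).1 "").toList.length := by
      rcases Nat.lt_or_ge (pvAdvance w1 w1.length i1 j1).2 (w1.getD (pvAdvance w1 w1.length i1 j1).1 "").toList.length with hlt | hge
      · exact hlt
      · exact absurd ⟨by rcases hends with ⟨hh, -⟩; omega, by omega⟩ hf1
    have hj2 : (pvAdvance w2 w2.length i2 j2).2 < (w2.getD (pvAdvance w2 w2.length i2 j2).1 "").toList.length := by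
      rcases Nat.lt_or_ge (pvAdvance w2 w2.length i2 j2).2 (w2.getD (pvAdvance w2 w2.length i2 j2).1 "").toList.length with hlt | hge
      · exact hlt
      · exact absurd ⟨by rcases hends with ⟨-, hh⟩; omega, by omega⟩ hf2
    exact hno _ _ (List.getElem?_eq_some_iff.mpr ⟨hj1, rfl⟩) (List.getElem?_eq_some_iff.mpr ⟨hj2, rfl⟩)

theorem pvFoldl_append_toList (word : List String) (s : String) :
    (word.foldl (fun acc d => acc ++ d) s).toList = s.toList ++ (word.map String.toList).flatten := by
  induction word generalizing s with
  | nil => simp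
  | cons h t ih => simp [List.foldl, ih]

-- ===== VERDICT (by name: the statement is the Claim_ definition above) =====
theorem arrayStringsAreEqual3_spec : Claim_equal_arrayStringsAreEqual3 := by
  intro word1 word2 _
  unfold Spec_arrayStringsAreEqual3 arrayStringsAreEqual3 arrayStringsAreEqual3_alt
  rw [pvCmpLoop_eq_rest word1 word2 (pvTotal word1 + 1) 0 0 0 0
        (Nat.zero_le _) (Nat.zero_le _) (Nat.zero_le _) (Nat.zero_le _) (by simp [pvConsumed])]
  unfold pvRest
  simp only [List.drop_zero]
  have h1 := pvFoldl_append_toList word1 ""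
  have h2 := pvFoldl_append_toList word2 ""
  by_cases h : (word1.map String.toList).flatten = (word2.map String.toList).flatten
  · have : word1.foldl (fun acc d => acc ++ d) "" = word2.foldl (fun acc d => acc ++ d) "" := by
      apply String.ext
      rw [h1, h2, h]
    simp [this, h]
  · have : word1.foldl (fun acc d => acc ++ d) "" ≠ word2.foldl (fun acc d => acc ++ d) "" := by
      intro he; apply h
      have := congrArg String.toList he
      rwa [h1, h2] at this
    simp [this, h]
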